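-- pv_equiv track=rewrite | github.com/NielsAdr/Stage_deepflowering | Data_visualisation/sorting_exportation.py | generate_tab_index
-- ===== SOURCE A (Python) =====
-- def generate_tab_index(i, j):
--     tab_index = []
--     start = 0
--     for row in range(i):
--         end = start + j
--         tab_index.append(list(range(start, end)))
--         start = end
--     return tab_index
-- ===== SOURCE B (Python) =====
-- def generate_tab_index(i, j):
--     flat = list(range(max(i, 0) * max(j, 0)))
--     return [flat[r * j:(r + 1) * j] for r in range(i)]
-- ===== Notes on version B (the rewrite author's own statement) =====
-- stated objective: alternative
-- what changed: B materializes the whole index sequence once as flat = list(range(max(i,0)*max(j,0))) and slices it into rows of length j, instead of A's per-row range construction driven by a carried start accumulator.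
import Mathlib
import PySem

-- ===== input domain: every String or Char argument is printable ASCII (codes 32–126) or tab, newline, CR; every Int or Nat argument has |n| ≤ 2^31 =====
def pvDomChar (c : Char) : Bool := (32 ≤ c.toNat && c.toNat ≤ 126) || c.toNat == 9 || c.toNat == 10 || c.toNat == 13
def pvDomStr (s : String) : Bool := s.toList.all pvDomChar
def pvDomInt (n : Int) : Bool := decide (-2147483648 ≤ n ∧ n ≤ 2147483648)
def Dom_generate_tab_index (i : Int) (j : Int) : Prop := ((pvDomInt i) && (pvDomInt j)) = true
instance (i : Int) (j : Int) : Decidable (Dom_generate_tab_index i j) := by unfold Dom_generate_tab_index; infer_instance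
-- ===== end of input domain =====

-- B builds the flat sequence list(range(i*j)) once and slices it into rows, instead of A's
-- per-row range construction carried by a `start` accumulator (objective: alternative decomposition).

-- ===== PORT A =====
-- A: tab_index = []; start = 0; for row in range(i): end = start+j; append(list(range(start,end))); start = end
def generate_tab_index (i : Int) (j : Int) : List (List Int) :=
  let st := (PySem.List.pyRange 0 i 1).foldl
    (fun (st : List (List Int) × Int) (_row : Int) =>
      let start := st.2
      let «end» := start + j
      (st.1 ++ [PySem.List.pyRange start «end» 1], «end»))
    ([], 0)
  st.1

-- ===== PORT B =====
-- B: flat = list(range(max(i,0)*max(j,0))); [flat[r*j:(r+1)*j] for r in range(i)]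
def generate_tab_index_alt (i : Int) (j : Int) : List (List Int) :=
  let flat := PySem.List.pyRange 0 (max i 0 * max j 0) 1
  (PySem.List.pyRange 0 i 1).map
    (fun r => PySem.List.slice flat (some (r * j)) (some ((r + 1) * j)))

-- ===== PRECONDITION & SPEC =====
def Spec_generate_tab_index (i : Int) (j : Int) (out : List (List Int)) : Prop := out = generate_tab_index_alt i j
instance (i : Int) (j : Int) (out : List (List Int)) : Decidable (Spec_generate_tab_index i j out) := by unfold Spec_generate_tab_index; infer_instance

-- ===== CLAIM (what is proved, stated in full; the proofs are below) =====
def Claim_equal_generate_tab_index : Prop := ∀ (i : Int) (j : Int), Dom_generate_tab_index i j → Spec_generate_tab_index i j (generate_tab_index i j)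

-- ===== LEMMAS AND PROOFS =====

-- A's fold over range(n) produces the rows [r*j, r*j+j) and final start n*j.
lemma foldA (j : Int) (n : Nat) :
    (PySem.List.pyRange 0 (n : Int) 1).foldl
      (fun (st : List (List Int) × Int) (_row : Int) =>
        (st.1 ++ [PySem.List.pyRange st.2 (st.2 + j) 1], st.2 + j))
      ([], 0)
    = ((PySem.List.pyRange 0 (n : Int) 1).map
        (fun r => PySem.List.pyRange (r * j) (r * j + j) 1), (n : Int) * j) := by
  induction n with
  | zero => simp [PySem.List.pyRange_one_eq_nil]
  | succ m ih =>
      have hsplit : PySem.List.pyRange 0 ((m + 1 : Nat) : Int) 1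
          = PySem.List.pyRange 0 (m : Int) 1 ++ [(m : Int)] := by
        push_cast
        exact PySem.List.pyRange_one_succ_right (Int.natCast_nonneg m)
      rw [hsplit, List.foldl_append, ih, List.map_append]
      simp [add_mul]

-- the per-row slice of the flat range equals the per-row range
lemma row_eq (i j r : Int) (hr0 : 0 ≤ r) (hri : r < i) :
    PySem.List.slice (PySem.List.pyRange 0 (max i 0 * max j 0) 1) (some (r * j)) (some ((r + 1) * j))
      = PySem.List.pyRange (r * j) (r * j + j) 1 := by
  rcases (by omega : j ≤ 0 ∨ 0 < j) with hj | hj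
  · have h1 : max i 0 * max j 0 ≤ 0 := by
      have : max j 0 = 0 := by omega
      rw [this, mul_zero]
    rw [PySem.List.pyRange_one_eq_nil h1, PySem.List.pyRange_one_eq_nil (by omega)]
    simp [PySem.List.slice]
  · -- j > 0 : split flat at r*j and (r+1)*j
    have h0 : 0 ≤ r * j := mul_nonneg hr0 (le_of_lt hj)
    have h1 : r * j ≤ (r + 1) * j := mul_le_mul_of_nonneg_right (by omega) hj.le
    have h2 : (r + 1) * j ≤ i * j := mul_le_mul_of_nonneg_right (by omega) hj.le
    have hmax : max i 0 * max j 0 = i * j := by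
      have h3 : max i 0 = i := by omega
      have h4 : max j 0 = j := by omega
      rw [h3, h4]
    rw [hmax]
    have hsplit : PySem.List.pyRange 0 (i * j) 1
        = PySem.List.pyRange 0 (r * j) 1 ++
          (PySem.List.pyRange (r * j) ((r + 1) * j) 1 ++ PySem.List.pyRange ((r + 1) * j) (i * j) 1) := by
      rw [← PySem.List.pyRange_one_append (r * j) ((r + 1) * j) (i * j) h1 h2,
          ← PySem.List.pyRange_one_append 0 (r * j) (i * j) h0 (le_trans h1 h2)]
    rw [hsplit, PySem.List.slice_toNat _ h0 (le_trans h0 h1)]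
    have hlen1 : (PySem.List.pyRange 0 (r * j) 1).length = (r * j).toNat := by
      rw [PySem.List.length_pyRange_one]; omega
    rw [List.drop_left' hlen1]
    have hlen2 : (PySem.List.pyRange (r * j) ((r + 1) * j) 1).length
        = ((r + 1) * j).toNat - (r * j).toNat := by
      rw [PySem.List.length_pyRange_one]; omega
    rw [List.take_left' hlen2]
    congr 1
    ring

theorem generate_tab_index_spec : Claim_equal_generate_tab_index := by
  intro i j _
  show generate_tab_index i j = generate_tab_index_alt i j
  unfold generate_tab_index generate_tab_index_alt
  rcases (by omega : i ≤ 0 ∨ 0 < i) with hi | hi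
  · simp [PySem.List.pyRange_one_eq_nil hi]
  · have hcast : i = ((i.toNat : Nat) : Int) := by omega
    rw [hcast, foldA j i.toNat]
    exact List.map_congr_left (fun r hr => by
      have := (PySem.List.mem_pyRange_one).1 hr
      exact (row_eq _ j r this.1 (by omega)).symm)
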